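-- pv_equiv track=rewrite | github.com/arxanas/advent-of-code | year2022/utils.py | only
-- ===== SOURCE A (Python) =====
-- from typing import Callable, Generic, Iterable, Optional, Sequence, TypeVar, cast
--
-- T = TypeVar("T")
--
-- def only(seq: Iterable[T]) -> Optional[T]:
--     """Return the only element of the iterable, or return None if the iterable
--     is empty or has more than one element."""
--     seen_elem = False
--     to_return = None
--     for elem in seq:
--         if seen_elem:
--             return None
--         to_return = elem
--         seen_elem = True
--     if not seen_elem:
--         return None
--     return to_return
-- ===== SOURCE B (Python) =====
-- from typing import Iterable, Optional, TypeVar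
--
-- T = TypeVar("T")
--
-- def only(seq: Iterable[T]) -> Optional[T]:
--     """Return the only element, else None: let Python's iterable-unpacking
--     protocol do the counting — a 1-tuple unpack succeeds iff the iterable
--     yields exactly one element, and raises ValueError otherwise."""
--     try:
--         (result,) = seq
--     except ValueError:
--         return None
--     return result
-- ===== Notes on version B (the rewrite author's own statement) =====
-- stated objective: idiomatic
-- what changed: Replaces the seen_elem-flag loop with early return by exception-driven singleton tuple unpacking: '(result,) = seq' succeeds exactly when the iterable has one element, ValueError maps to None; no loop, flag or length check remains.
import Mathlib
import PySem

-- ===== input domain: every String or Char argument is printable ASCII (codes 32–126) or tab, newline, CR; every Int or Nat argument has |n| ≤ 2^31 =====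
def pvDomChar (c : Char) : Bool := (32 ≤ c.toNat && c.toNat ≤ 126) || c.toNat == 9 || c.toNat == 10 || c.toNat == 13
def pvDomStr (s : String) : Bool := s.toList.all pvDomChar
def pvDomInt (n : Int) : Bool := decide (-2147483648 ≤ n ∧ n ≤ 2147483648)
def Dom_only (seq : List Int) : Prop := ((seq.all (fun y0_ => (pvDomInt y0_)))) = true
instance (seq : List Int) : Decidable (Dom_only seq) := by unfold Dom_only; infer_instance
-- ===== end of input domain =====

-- B replaces A's seen_elem-flag loop with exception-driven singleton tuple unpacking (objective: idiomatic).

-- ===== PORT A =====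
-- literal port of A's loop: state (seen_elem, to_return), early `return None` on a second element
def onlyLoop (seq : List Int) (seen_elem : Bool) (to_return : Option Int) : Option Int :=
  match seq with
  | [] => if !seen_elem then none else to_return
  | elem :: rest =>
      if seen_elem then none
      else onlyLoop rest true (some elem)

def only (seq : List Int) : Option Int := onlyLoop seq false none

-- ===== PORT B =====
-- port of Source B: `(result,) = seq` succeeds exactly on a singleton (→ result),
-- any other shape raises ValueError which Source B maps to None
def only_alt (seq : List Int) : Option Int :=
  match seq with
  | [result] => some result
  | _ => none

-- ===== PRECONDITION & SPEC =====
def Spec_only (seq : List Int) (out : Option Int) : Prop := out = only_alt seq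
instance (seq : List Int) (out : Option Int) : Decidable (Spec_only seq out) := by unfold Spec_only; infer_instance

-- ===== CLAIM (what is proved, stated in full; the proofs are below) =====
def Claim_equal_only : Prop := ∀ (seq : List Int), Dom_only seq → Spec_only seq (only seq)

-- ===== LEMMAS AND PROOFS =====

-- ===== VERDICT (by name: the statement is the Claim_ definition above) =====
theorem only_spec : Claim_equal_only := by
  intro seq _
  unfold Spec_only only
  match seq with
  | [] => rfl
  | [x] => rfl
  | x :: y :: rest => rfl
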